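-- pv_equiv track=rewrite | github.com/Nazmul1850/lamdams | circuits/fetch_benchmarks.py | analyse_circuit
-- ===== SOURCE A (Python) =====
-- def analyse_circuit(qasm_text: str) -> dict:
--     """Count qubits, T-gates, total gates from QASM text."""
--     qubits, t_count, total = 0, 0, 0
--     for line in qasm_text.splitlines():
--         line = line.strip()
--         if line.startswith("qreg"):
--             # qreg q[n];
--             try:
--                 qubits += int(line.split("[")[1].split("]")[0])
--             except Exception:
--                 pass
--         elif not line.startswith("//") and not line.startswith("OPENQASM") \
--                 and not line.startswith("include") and line.endswith(";"):
--             token = line.split("(")[0].split(" ")[0].lower().rstrip(";")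
--             if token in {"t", "tdg"}:
--                 t_count += 1
--             if token not in {"", "qreg", "creg", "gate", "barrier", "measure"}:
--                 total += 1
--     return {"qubits": qubits, "t_count": t_count, "total_gates": total}
-- ===== SOURCE B (Python) =====
-- def _qreg_qubits(line):
--     """Qubit count of a stripped 'qreg' line (0 when the bracket/int parse fails)."""
--     parts = line.split("[")
--     if len(parts) < 2:
--         return 0
--     try:
--         return int(parts[1].split("]")[0])
--     except ValueError:
--         return 0
--
--
-- def _token(line):
--     """Gate token of a stripped statement line."""
--     return line.split("(")[0].split(" ")[0].lower().rstrip(";")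
--
--
-- _SKIP = {"", "qreg", "creg", "gate", "barrier", "measure"}
--
--
-- def analyse_circuit(qasm_text: str) -> dict:
--     """Count qubits, T-gates, total gates from QASM text."""
--     lines = [l.strip() for l in qasm_text.splitlines()]
--     qubits = sum(_qreg_qubits(l) for l in lines if l.startswith("qreg"))
--     tokens = [_token(l) for l in lines
--               if not l.startswith("qreg") and not l.startswith("//")
--               and not l.startswith("OPENQASM") and not l.startswith("include")
--               and l.endswith(";")]
--     t_count = tokens.count("t") + tokens.count("tdg")
--     total = sum(1 for t in tokens if t not in _SKIP)
--     return {"qubits": qubits, "t_count": t_count, "total_gates": total}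
-- ===== Notes on version B (the rewrite author's own statement) =====
-- stated objective: alternative
-- what changed: A's single loop with three scalar accumulators is replaced by a strip/filter/map pipeline that first builds the list of gate tokens (and the qreg-line list), then derives t_count via list.count and total via a filtered count after the loop.
import Mathlib
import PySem

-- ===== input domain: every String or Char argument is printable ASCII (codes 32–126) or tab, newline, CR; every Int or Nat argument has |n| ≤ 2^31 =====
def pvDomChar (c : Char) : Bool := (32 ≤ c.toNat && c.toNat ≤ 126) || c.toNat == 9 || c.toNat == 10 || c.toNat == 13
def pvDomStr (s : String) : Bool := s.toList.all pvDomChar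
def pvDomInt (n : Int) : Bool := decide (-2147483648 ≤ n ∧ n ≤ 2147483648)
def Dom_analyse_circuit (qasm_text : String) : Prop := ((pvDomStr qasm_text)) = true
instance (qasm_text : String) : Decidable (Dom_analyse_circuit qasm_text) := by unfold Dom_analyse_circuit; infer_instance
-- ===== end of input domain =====

-- B replaces A's single accumulator loop by a strip/filter/map pipeline that first extracts the
-- token list and then counts over it (objective: alternative decomposition, same cost).

-- shared string steps both Pythons perform literally on a stripped line:
-- hand port of line.split("[")[1].split("]")[0] → int(...) with the exception swallowed (none);
-- exact: split on a nonempty separator, int() = PySem.Int.ofChars?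
def pvQregVal (line : String) : Option Int :=
  match PySem.Chars.splitOn line.toList ['['] with
  | _ :: p :: _ => PySem.Int.ofChars? ((PySem.Chars.splitOn p [']']).headD [])
  | _ => none

-- hand port of s.rstrip(";"): exact, the strip set is the single char ';'
def pvRstripSemi (cs : List Char) : List Char :=
  (cs.reverse.dropWhile (· == ';')).reverse

-- line.split("(")[0].split(" ")[0].lower().rstrip(";")
def pvToken (line : String) : String :=
  String.ofList (pvRstripSemi (PySem.Chars.lower
    ((PySem.Chars.splitOn ((PySem.Chars.splitOn line.toList ['(']).headD []) [' ']).headD [])))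

def pvIsStmt (line : String) : Bool :=
  !(PySem.Str.startswith line "//") && !(PySem.Str.startswith line "OPENQASM") &&
  !(PySem.Str.startswith line "include") && PySem.Str.endswith line ";"

def pvSkip (t : String) : Bool :=
  t == "" || t == "qreg" || t == "creg" || t == "gate" || t == "barrier" || t == "measure"

-- ===== PORT A =====
-- A's loop body on the accumulator (qubits, t_count, total)
def pvStepA (st : Int × Int × Int) (l : String) : Int × Int × Int :=
  let line := PySem.Str.strip l
  if PySem.Str.startswith line "qreg" then
    match pvQregVal line with
    | some n => (st.1 + n, st.2.1, st.2.2)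
    | none => st
  else if pvIsStmt line then
    let token := pvToken line
    (st.1,
     (if token == "t" || token == "tdg" then st.2.1 + 1 else st.2.1),
     (if !pvSkip token then st.2.2 + 1 else st.2.2))
  else st

def analyse_circuit (qasm_text : String) : List (String × Int) :=
  let st := (PySem.Str.splitlines qasm_text).foldl pvStepA (0, 0, 0)
  [("qubits", st.1), ("t_count", st.2.1), ("total_gates", st.2.2)]

-- ===== PORT B =====
-- sum(_qreg_qubits(l) for l in lines if l.startswith("qreg"))
def pvQsum (lines : List String) : Int :=
  ((lines.filter (fun l => PySem.Str.startswith l "qreg")).map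
    (fun l => (pvQregVal l).getD 0)).sum

-- [_token(l) for l in lines if <qualifying statement line>]
def pvTokens (lines : List String) : List String :=
  (lines.filter (fun l => !(PySem.Str.startswith l "qreg") && pvIsStmt l)).map pvToken

def analyse_circuit_alt (qasm_text : String) : List (String × Int) :=
  let lines := (PySem.Str.splitlines qasm_text).map PySem.Str.strip
  let tokens := pvTokens lines
  [("qubits", pvQsum lines),
   ("t_count", (tokens.count "t" : Int) + (tokens.count "tdg" : Int)),
   ("total_gates", ((tokens.filter (fun t => !pvSkip t)).length : Int))]

-- ===== PRECONDITION & SPEC =====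
def Spec_analyse_circuit (qasm_text : String) (out : List (String × Int)) : Prop := out = analyse_circuit_alt qasm_text
instance (qasm_text : String) (out : List (String × Int)) : Decidable (Spec_analyse_circuit qasm_text out) := by unfold Spec_analyse_circuit; infer_instance

-- ===== CLAIM (what is proved, stated in full; the proofs are below) =====
def Claim_equal_analyse_circuit : Prop := ∀ (qasm_text : String), Dom_analyse_circuit qasm_text → Spec_analyse_circuit qasm_text (analyse_circuit qasm_text)

-- ===== LEMMAS AND PROOFS =====

theorem pvStepA_fst (st : Int × Int × Int) (l : String) :
    (pvStepA st l).1 = st.1 +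
      (if PySem.Str.startswith (PySem.Str.strip l) "qreg" = true
       then (pvQregVal (PySem.Str.strip l)).getD 0 else 0) := by
  simp only [pvStepA]
  by_cases hq : PySem.Str.startswith (PySem.Str.strip l) "qreg" = true
  · simp only [hq, if_pos]
    cases hv : pvQregVal (PySem.Str.strip l) <;> simp [hv]
  · simp only [hq, if_false, if_neg hq]
    by_cases hs : pvIsStmt (PySem.Str.strip l) = true <;> simp [hs]

theorem pvStepA_t (st : Int × Int × Int) (l : String) :
    (pvStepA st l).2.1 = st.2.1 +
      (if ((!(PySem.Str.startswith (PySem.Str.strip l) "qreg") && pvIsStmt (PySem.Str.strip l))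
            && (pvToken (PySem.Str.strip l) == "t" || pvToken (PySem.Str.strip l) == "tdg")) = true
       then 1 else 0) := by
  simp only [pvStepA]
  by_cases hq : PySem.Str.startswith (PySem.Str.strip l) "qreg" = true
  · simp only [hq, if_pos, Bool.not_true, Bool.false_and, Bool.false_eq_true, if_false, add_zero]
    cases hv : pvQregVal (PySem.Str.strip l) <;> simp [hv]
  · simp only [Bool.not_eq_true] at hq
    simp only [hq, Bool.false_eq_true, if_false, Bool.not_false, Bool.true_and]
    by_cases hs : pvIsStmt (PySem.Str.strip l) = true
    · simp only [hs, if_pos, Bool.true_and]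
      by_cases ht : (pvToken (PySem.Str.strip l) == "t"
          || pvToken (PySem.Str.strip l) == "tdg") = true <;> simp [ht]
    · simp only [Bool.not_eq_true] at hs
      simp [hs]

theorem pvStepA_tot (st : Int × Int × Int) (l : String) :
    (pvStepA st l).2.2 = st.2.2 +
      (if ((!(PySem.Str.startswith (PySem.Str.strip l) "qreg") && pvIsStmt (PySem.Str.strip l))
            && !pvSkip (pvToken (PySem.Str.strip l))) = true
       then 1 else 0) := by
  simp only [pvStepA]
  by_cases hq : PySem.Str.startswith (PySem.Str.strip l) "qreg" = true
  · simp only [hq, if_pos, Bool.not_true, Bool.false_and, Bool.false_eq_true, if_false, add_zero]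
    cases hv : pvQregVal (PySem.Str.strip l) <;> simp [hv]
  · simp only [Bool.not_eq_true] at hq
    simp only [hq, Bool.false_eq_true, if_false, Bool.not_false, Bool.true_and]
    by_cases hs : pvIsStmt (PySem.Str.strip l) = true
    · simp only [hs, if_pos, Bool.true_and]
      by_cases hk : (!pvSkip (pvToken (PySem.Str.strip l))) = true <;> simp [hk]
    · simp only [Bool.not_eq_true] at hs
      simp [hs]

theorem pvQsum_cons (l : String) (ls : List String) :
    pvQsum (l :: ls) =
      (if PySem.Str.startswith l "qreg" = true then (pvQregVal l).getD 0 else 0) + pvQsum ls := by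
  simp only [pvQsum, List.filter_cons]
  by_cases h : PySem.Str.startswith l "qreg" = true <;> simp at h <;> simp [h]

theorem pvTokens_cons (l : String) (ls : List String) :
    pvTokens (l :: ls) =
      (if (!(PySem.Str.startswith l "qreg") && pvIsStmt l) = true then [pvToken l] else [])
        ++ pvTokens ls := by
  simp only [pvTokens, List.filter_cons]
  by_cases h : PySem.Chars.startswith l.toList ['q', 'r', 'e', 'g'] = false ∧ pvIsStmt l = true <;>
    simp [h]

theorem pv_fold_fst (ls : List String) (st : Int × Int × Int) :
    (ls.foldl pvStepA st).1 = st.1 + pvQsum (ls.map PySem.Str.strip) := by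
  induction ls generalizing st with
  | nil => simp [pvQsum]
  | cons a as ih =>
    rw [List.foldl_cons, ih, pvStepA_fst, List.map_cons, pvQsum_cons]
    ring

theorem pv_fold_t (ls : List String) (st : Int × Int × Int) :
    (ls.foldl pvStepA st).2.1
      = st.2.1 + ((pvTokens (ls.map PySem.Str.strip)).count "t" : Int)
               + ((pvTokens (ls.map PySem.Str.strip)).count "tdg" : Int) := by
  induction ls generalizing st with
  | nil => simp [pvTokens]
  | cons a as ih =>
    rw [List.foldl_cons, ih, pvStepA_t, List.map_cons, pvTokens_cons]
    by_cases hc : (!(PySem.Str.startswith (PySem.Str.strip a) "qreg")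
        && pvIsStmt (PySem.Str.strip a)) = true
    · simp only [hc, if_pos, Bool.true_and, List.singleton_append, List.count_cons]
      by_cases h1 : (pvToken (PySem.Str.strip a) == "t") = true
      · have h2 : (pvToken (PySem.Str.strip a) == "tdg") = false := by
          simp only [beq_iff_eq] at h1 ⊢
          simp [h1]
        simp only [h1, h2, Bool.true_or, if_pos, Bool.false_eq_true, if_false, add_zero]
        push_cast
        ring
      · simp only [Bool.not_eq_true] at h1
        by_cases h2 : (pvToken (PySem.Str.strip a) == "tdg") = true
        · simp only [h1, h2, Bool.false_or, if_pos]
          push_cast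
          ring
        · simp only [Bool.not_eq_true] at h2
          simp only [h1, h2, Bool.or_self, Bool.false_eq_true, if_false, add_zero]
    · simp only [Bool.not_eq_true] at hc
      simp only [hc, Bool.false_and, Bool.false_eq_true, if_false, List.nil_append, add_zero]

theorem pv_fold_tot (ls : List String) (st : Int × Int × Int) :
    (ls.foldl pvStepA st).2.2
      = st.2.2 + (((pvTokens (ls.map PySem.Str.strip)).filter (fun t => !pvSkip t)).length : Int) := by
  induction ls generalizing st with
  | nil => simp [pvTokens]
  | cons a as ih =>
    rw [List.foldl_cons, ih, pvStepA_tot, List.map_cons, pvTokens_cons]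
    by_cases hc : (!(PySem.Str.startswith (PySem.Str.strip a) "qreg")
        && pvIsStmt (PySem.Str.strip a)) = true
    · simp only [hc, if_pos, Bool.true_and, List.singleton_append, List.filter_cons]
      by_cases hk : (!pvSkip (pvToken (PySem.Str.strip a))) = true
      · simp only [hk, if_pos, List.length_cons]
        push_cast
        ring
      · simp only [Bool.not_eq_true] at hk
        simp only [hk, Bool.false_eq_true, if_false, add_zero]
    · simp only [Bool.not_eq_true] at hc
      simp only [hc, Bool.false_and, Bool.false_eq_true, if_false, List.nil_append, add_zero]

-- ===== VERDICT (by name: the statement is the Claim_ definition above) =====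
theorem analyse_circuit_spec : Claim_equal_analyse_circuit := by
  intro qasm_text _
  unfold Spec_analyse_circuit
  simp only [analyse_circuit, analyse_circuit_alt, pv_fold_fst, pv_fold_t, pv_fold_tot, zero_add]
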